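-- pv_equiv track=rewrite | github.com/houidef/Zeta | zeta0.py | borwein_coefficients
-- ===== SOURCE A (Python) =====
-- borwein_cache = {}
--
-- def borwein_coefficients(n):
--     if n in borwein_cache:
--         return borwein_cache[n]
--     ds = [0] * (n+1)
--     d = 1
--     s = ds[0] = 1
--     for i in range(1, n+1):
--         d = d * 4 * (n+i-1) * (n-i+1)
--         d //= ((2*i) * ((2*i)-1))
--         s += d
--         ds[i] = s
--     borwein_cache[n] = ds
--     return ds
-- ===== SOURCE B (Python) =====
-- borwein_cache = {}
--
-- def borwein_coefficients(n):
--     # Build the terms back-to-front: the last term is d_n = 4**n // 2, and each earlier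
--     # term follows by the inverse ratio; then reverse and prefix-sum (ds[0] = 1).
--     if n in borwein_cache:
--         return borwein_cache[n]
--     terms = []
--     d = 4 ** n // 2
--     for i in range(n, 0, -1):
--         terms.append(d)
--         d = d * ((2 * i) * (2 * i - 1)) // (4 * (n + i - 1) * (n - i + 1))
--     ds = [1]
--     s = 1
--     for t in reversed(terms):
--         s += t
--         ds.append(s)
--     borwein_cache[n] = ds
--     return ds
-- ===== Notes on version B (the rewrite author's own statement) =====
-- stated objective: alternative
-- what changed: Instead of A's forward loop that updates the term multiplicatively and writes prefix sums into a preallocated array, B builds the term list back-to-front starting from the closed-form last term 4**n // 2 and stepping by the inverse ratio, then reverses it and prefix-sums in a second pass.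
import Mathlib
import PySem

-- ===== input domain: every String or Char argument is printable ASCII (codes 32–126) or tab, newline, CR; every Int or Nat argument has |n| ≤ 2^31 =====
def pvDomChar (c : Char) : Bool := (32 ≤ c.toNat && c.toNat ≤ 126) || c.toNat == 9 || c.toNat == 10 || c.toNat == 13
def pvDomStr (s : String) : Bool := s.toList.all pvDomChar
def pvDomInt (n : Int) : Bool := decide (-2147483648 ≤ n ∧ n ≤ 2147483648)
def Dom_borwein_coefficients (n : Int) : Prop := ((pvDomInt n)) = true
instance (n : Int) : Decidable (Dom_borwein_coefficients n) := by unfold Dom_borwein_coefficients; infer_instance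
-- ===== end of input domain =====

-- B builds the term list back-to-front from the closed-form last term 4^n // 2 by the
-- inverse ratio, then reverses it and prefix-sums, instead of A's forward in-place
-- update-and-store loop (alternative).

-- ===== PORT A =====
def borweinStepA (n : Int) (st : List Int × Int × Int) (i : Int) : List Int × Int × Int :=
  let d := PySem.Int.floordiv (st.2.1 * 4 * (n + i - 1) * (n - i + 1)) ((2 * i) * (2 * i - 1))
  let s := st.2.2 + d
  (PySem.List.pySetD st.1 i s, d, s)

def borwein_coefficients (n : Int) : List Int :=
  ((PySem.List.pyRange 1 (n + 1) 1).foldl (borweinStepA n)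
    (PySem.List.pySetD (List.replicate (n + 1).toNat (0 : Int)) 0 1, 1, 1)).1

-- ===== PORT B =====
def borweinDown (n : Int) (st : List Int × Int) (i : Int) : List Int × Int :=
  (st.1 ++ [st.2],
   PySem.Int.floordiv (st.2 * ((2 * i) * (2 * i - 1))) (4 * (n + i - 1) * (n - i + 1)))

def borwein_coefficients_alt (n : Int) : List Int :=
  ((((PySem.List.pyRange n 0 (-1)).foldl (borweinDown n)
        ([], PySem.Int.floordiv (4 ^ n.toNat) 2)).1.reverse).foldl
    (fun st t => (st.1 ++ [st.2 + t], st.2 + t)) ([(1 : Int)], (1 : Int))).1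

-- ===== PRECONDITION & SPEC =====
-- Pre_ excludes n < 0, on which Python A raises IndexError (ds[0] = 1 on the empty list).
def Pre_borwein_coefficients (n : Int) : Prop := 0 ≤ n
instance (n : Int) : Decidable (Pre_borwein_coefficients n) := by unfold Pre_borwein_coefficients; infer_instance
def pvWitness_borwein_coefficients : Int := (3)

def Spec_borwein_coefficients (n : Int) (out : List Int) : Prop := out = borwein_coefficients_alt n
instance (n : Int) (out : List Int) : Decidable (Spec_borwein_coefficients n out) := by unfold Spec_borwein_coefficients; infer_instance

-- ===== CLAIM (what is proved, stated in full; the proofs are below) =====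
def Claim_equal_borwein_coefficients : Prop := ∀ (n : Int), Dom_borwein_coefficients n → Pre_borwein_coefficients n → Spec_borwein_coefficients n (borwein_coefficients n)

-- ===== LEMMAS AND PROOFS =====

-- closed (binomial) form of A's running term d after loop step i (for n = N ≥ 1)
def bc (N i : Nat) : Int :=
  if i = 0 then 1
  else 4 ^ i * ((N + i).choose (2 * i)) - 2 * 4 ^ (i - 1) * ((N + i - 1).choose (2 * i - 1))

-- the running sum s after loop step i
def bsum (N i : Nat) : Int := ∑ j ∈ Finset.range (i + 1), bc N j

-- the filled prefix of ds after loop step m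
def psList (N m : Nat) : List Int := (List.range (m + 1)).map (bsum N)

-- bc's defining divisibility identity: bc (M+1) i * ((M+1-i)! * (2i)!) = 4^i * (M+1) * (M+i)!
lemma bc_key (M i : Nat) (hi : i ≤ M + 1) :
    bc (M + 1) i * (((M + 1 - i).factorial : Int) * ((2 * i).factorial : Int))
      = 4 ^ i * (M + 1) * ((M + i).factorial : Int) := by
  cases i with
  | zero => simp [bc, Nat.factorial_succ]
  | succ j =>
      have hjM : j ≤ M := by omega
      have h1 := Nat.choose_mul_factorial_mul_factorial (n := M + 1 + (j + 1)) (k := 2 * (j + 1)) (by omega)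
      have h2 := Nat.choose_mul_factorial_mul_factorial (n := M + 1 + (j + 1) - 1) (k := 2 * (j + 1) - 1) (by omega)
      have e1 : M + 1 + (j + 1) - 2 * (j + 1) = M - j := by omega
      have e2 : M + 1 + (j + 1) - 1 - (2 * (j + 1) - 1) = M - j := by omega
      have e3 : M + 1 + (j + 1) - 1 = M + j + 1 := by omega
      have e4 : 2 * (j + 1) - 1 = 2 * j + 1 := by omega
      have e5 : M + 1 - (j + 1) = M - j := by omega
      have e6 : M + (j + 1) = M + j + 1 := by omega
      rw [e1] at h1; rw [e2, e3, e4] at h2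
      have f1 : ((2 * (j + 1)).factorial : Int) = 2 * ((j : Int) + 1) * ((2 * j + 1).factorial : Int) := by
        rw [show 2 * (j + 1) = (2 * j + 1) + 1 from by omega, Nat.factorial_succ]; push_cast; ring
      have f2 : ((M + 1 + (j + 1)).factorial : Int) = ((M : Int) + (j : Int) + 2) * ((M + j + 1).factorial : Int) := by
        rw [show M + 1 + (j + 1) = (M + j + 1) + 1 from by omega, Nat.factorial_succ]; push_cast; ring
      have h1' : ((M + 1 + (j + 1)).choose (2 * (j + 1)) : Int) * ((2 * (j + 1)).factorial : Int) * ((M - j).factorial : Int) = ((M + 1 + (j + 1)).factorial : Int) := by exact_mod_cast congrArg (Nat.cast : Nat → Int) h1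
      have h2' : ((M + j + 1).choose (2 * j + 1) : Int) * ((2 * j + 1).factorial : Int) * ((M - j).factorial : Int) = ((M + j + 1).factorial : Int) := by exact_mod_cast congrArg (Nat.cast : Nat → Int) h2
      simp only [bc, e3, e4, e5, e6, Nat.succ_ne_zero, if_false, Nat.add_sub_cancel]
      push_cast [pow_succ]
      linear_combination (4 ^ j * (4:Int)) * h1' + (4 ^ j * (4:Int)) * f2
        - (2 * 4 ^ j * ((M + j + 1).choose (2 * j + 1) : Int) * ((M - j).factorial : Int)) * f1
        - (4 ^ j * 4 * ((j : Int) + 1)) * h2'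

-- the ratio identity matching A's update step
lemma bc_step (M j : Nat) (hj : j ≤ M) :
    bc (M + 1) j * (4 * ((M : Int) + 1 + j) * ((M : Int) + 1 - j))
      = bc (M + 1) (j + 1) * ((2 * ((j : Int) + 1)) * (2 * ((j : Int) + 1) - 1)) := by
  have K1 := bc_key M j (by omega)
  have K2 := bc_key M (j + 1) (by omega)
  have g1 : ((M + 1 - j).factorial : Int) = ((M : Int) + 1 - j) * ((M - j).factorial : Int) := by
    rw [show M + 1 - j = (M - j) + 1 from by omega, Nat.factorial_succ]; push_cast [Nat.cast_sub hj]; ring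
  have g2 : ((2 * (j + 1)).factorial : Int)
      = (2 * ((j : Int) + 1)) * (2 * ((j : Int) + 1) - 1) * ((2 * j).factorial : Int) := by
    rw [show 2 * (j + 1) = (2 * j + 1) + 1 from by omega, Nat.factorial_succ,
      show 2 * j + 1 = (2 * j) + 1 from rfl, Nat.factorial_succ]; push_cast; ring
  have g3 : ((M + (j + 1)).factorial : Int) = ((M : Int) + 1 + j) * ((M + j).factorial : Int) := by
    rw [show M + (j + 1) = (M + j) + 1 from by omega, Nat.factorial_succ]; push_cast; ring
  have e5 : M + 1 - (j + 1) = M - j := by omega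
  rw [e5] at K2
  rw [g1] at K1
  rw [g2, g3] at K2
  have hX : (((M - j).factorial : Int) * ((2 * j).factorial : Int)) ≠ 0 := by positivity
  apply mul_right_cancel₀ hX
  linear_combination (4 * ((M : Int) + 1 + j)) * K1 - K2

lemma floordiv_mul_self (a b : Int) (hb : 0 < b) : PySem.Int.floordiv (a * b) b = a := by
  rw [PySem.Int.floordiv_eq_ediv_of_pos hb, Int.mul_ediv_cancel _ (ne_of_gt hb)]

lemma set_at_length {α : Type} (xs ys : List α) (y v : α) :
    (xs ++ y :: ys).set xs.length v = xs ++ v :: ys := by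
  induction xs with
  | nil => rfl
  | cons x xs ih => simp [ih]

lemma set_at_length' {α : Type} (xs ys : List α) (y v : α) (n : Nat) (h : n = xs.length) :
    (xs ++ y :: ys).set n v = xs ++ v :: ys := by
  rw [h, set_at_length]

lemma psList_succ (N m : Nat) : psList N (m + 1) = psList N m ++ [bsum N (m + 1)] := by
  simp [psList, List.range_succ]

-- loop invariant for A: after m steps ds holds the first m+1 prefix sums, d = bc m, s = bsum m
lemma A_loop (M m : Nat) (hm : m ≤ M + 1) :
    (PySem.List.pyRange 1 ((m : Int) + 1) 1).foldl (borweinStepA ((M : Int) + 1))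
        (((1 : Int) :: List.replicate (M + 1) 0), 1, 1)
      = (psList (M + 1) m ++ List.replicate (M + 1 - m) 0, bc (M + 1) m, bsum (M + 1) m) := by
  induction m with
  | zero =>
      rw [PySem.List.pyRange_one_eq_nil (by norm_num)]
      simp [psList, bsum, bc, List.replicate_succ]
  | succ m ih =>
      have hmM : m ≤ M := by omega
      push_cast
      rw [PySem.List.pyRange_one_succ_right (by omega), List.foldl_append, ih (by omega)]
      simp only [List.foldl, borweinStepA]
      have hnum : bc (M + 1) m * 4 * ((M : Int) + 1 + ((m : Int) + 1) - 1) * ((M : Int) + 1 - ((m : Int) + 1) + 1)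
          = bc (M + 1) (m + 1) * (2 * ((m : Int) + 1) * (2 * ((m : Int) + 1) - 1)) := by
        rw [← bc_step M m hmM]; ring
      rw [hnum, floordiv_mul_self _ _ (mul_pos (by omega) (by omega))]
      have hsum : bsum (M + 1) m + bc (M + 1) (m + 1) = bsum (M + 1) (m + 1) := by
        simp only [bsum, Finset.sum_range_succ]
      rw [hsum]
      have hset : PySem.List.pySetD (psList (M + 1) m ++ List.replicate (M + 1 - m) 0)
            ((m : Int) + 1) (bsum (M + 1) (m + 1))
          = psList (M + 1) (m + 1) ++ List.replicate (M + 1 - (m + 1)) 0 := by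
        have h1 : ((m : Int) + 1) = ((m + 1 : Nat) : Int) := by push_cast; ring
        rw [h1, PySem.List.pySetD_natCast]
        have hlen : (psList (M + 1) m).length = m + 1 := by simp [psList]
        have hrep : List.replicate (M + 1 - m) (0 : Int) = 0 :: List.replicate (M - m) 0 := by
          rw [show M + 1 - m = (M - m) + 1 from by omega, List.replicate_succ]
        rw [hrep, set_at_length' _ _ _ _ _ hlen.symm, psList_succ, List.append_assoc,
          List.singleton_append, show M + 1 - (m + 1) = M - m from by omega]
      rw [hset, Nat.succ_sub_succ]

-- the last term in closed form: bc N N = 4^N // 2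
lemma bc_top (M : Nat) : bc (M + 1) (M + 1) = 2 * 4 ^ M := by
  rw [bc, if_neg (Nat.succ_ne_zero M),
    show M + 1 + (M + 1) = 2 * (M + 1) from by omega, Nat.choose_self,
    Nat.choose_self, show M + 1 - 1 = M from rfl]
  push_cast
  rw [pow_succ]; ring

lemma floordiv_pow_two (M : Nat) : PySem.Int.floordiv ((4 : Int) ^ (M + 1)) 2 = 2 * 4 ^ M := by
  rw [show (4 : Int) ^ (M + 1) = (2 * 4 ^ M) * 2 from by rw [pow_succ]; ring]
  exact floordiv_mul_self _ _ (by norm_num)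

-- one backward step: dividing out the ratio recovers the previous term exactly
lemma down_step (M j : Nat) (hj : j ≤ M) :
    PySem.Int.floordiv (bc (M + 1) (j + 1) * ((2 * ((j : Int) + 1)) * (2 * ((j : Int) + 1) - 1)))
        (4 * (((M : Int) + 1) + ((j : Int) + 1) - 1) * (((M : Int) + 1) - ((j : Int) + 1) + 1))
      = bc (M + 1) j := by
  have h := bc_step M j hj
  rw [show 4 * (((M : Int) + 1) + ((j : Int) + 1) - 1) * (((M : Int) + 1) - ((j : Int) + 1) + 1)
      = 4 * ((M : Int) + 1 + j) * ((M : Int) + 1 - j) from by ring]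
  rw [show bc (M + 1) (j + 1) * ((2 * ((j : Int) + 1)) * (2 * ((j : Int) + 1) - 1))
      = bc (M + 1) j * (4 * ((M : Int) + 1 + j) * ((M : Int) + 1 - j)) from by rw [h]]
  exact floordiv_mul_self _ _ (by
    have h1 : (0 : Int) < (M : Int) + 1 + j := by positivity
    have h2 : (0 : Int) < (M : Int) + 1 - j := by
      have : (j : Int) ≤ (M : Int) := by exact_mod_cast hj
      omega
    positivity)

-- the terms produced by the backward pass, newest first
def descList (N i : Nat) : List Int := (List.range i).map (fun k => bc N (i - k))

lemma descList_succ (N i : Nat) : descList N (i + 1) = bc N (i + 1) :: descList N i := by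
  simp [descList, List.range_succ_eq_map, List.map_map, Function.comp,
    Nat.succ_sub_succ]

lemma descList_reverse (N i : Nat) :
    (descList N i).reverse = (List.range i).map (fun k => bc N (k + 1)) := by
  induction i with
  | zero => rfl
  | succ i ih =>
      rw [descList_succ, List.reverse_cons, ih, List.range_succ, List.map_append]
      simp

-- loop invariant for B's backward pass
lemma down_loop (M : Nat) (i : Nat) (hi : i ≤ M + 1) (ts : List Int) :
    (PySem.List.pyRange (i : Int) 0 (-1)).foldl (borweinDown ((M : Int) + 1)) (ts, bc (M + 1) i)
      = (ts ++ descList (M + 1) i, bc (M + 1) 0) := by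
  induction i generalizing ts with
  | zero =>
      rw [PySem.List.pyRange_neg_one_eq_nil (by norm_num)]
      simp [descList]
  | succ i ih =>
      push_cast
      rw [PySem.List.pyRange_neg_one_cons (by positivity)]
      simp only [List.foldl, borweinDown]
      rw [show (i : Int) + 1 - 1 = (i : Int) from by ring, down_step M i (by omega)]
      rw [ih (by omega)]
      rw [descList_succ]
      simp

-- loop invariant for B's prefix-sum pass over the reversed term list
lemma sum_loop (N m : Nat) :
    (((List.range m).map (fun k => bc N (k + 1))).foldl
        (fun st t => (st.1 ++ [st.2 + t], st.2 + t)) ([(1 : Int)], (1 : Int)))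
      = (psList N m, bsum N m) := by
  induction m with
  | zero => simp [psList, bsum, bc]
  | succ m ih =>
      rw [List.range_succ, List.map_append, List.foldl_append, ih]
      simp only [List.map, List.foldl]
      have hsum : bsum N m + bc N (m + 1) = bsum N (m + 1) := by
        simp only [bsum, Finset.sum_range_succ]
      rw [hsum, ← psList_succ]

-- ===== VERDICT (by name: the statement is the Claim_ definition above) =====
theorem borwein_coefficients_spec : Claim_equal_borwein_coefficients := by
  intro n _ hpre
  unfold Spec_borwein_coefficients
  have hn : 0 ≤ n := hpre
  obtain ⟨N, rfl⟩ : ∃ N : Nat, n = (N : Int) := ⟨n.toNat, by omega⟩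
  cases N with
  | zero => decide
  | succ M =>
      unfold borwein_coefficients borwein_coefficients_alt
      have hcast : ((M + 1 : Nat) : Int) = (M : Int) + 1 := by push_cast; ring
      rw [hcast]
      have hrep : ((M : Int) + 1 + 1).toNat = M + 2 := by omega
      have htn : ((M : Int) + 1).toNat = M + 1 := by omega
      rw [hrep, htn]
      have hds : PySem.List.pySetD (List.replicate (M + 2) (0 : Int)) 0 1
          = (1 : Int) :: List.replicate (M + 1) 0 := by
        rw [show ((0:Int)) = ((0 : Nat) : Int) from rfl, PySem.List.pySetD_natCast,
          List.replicate_succ, List.set_cons_zero]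
      rw [hds]
      have hA := A_loop M (M + 1) le_rfl
      rw [hcast] at hA
      rw [hA]
      rw [floordiv_pow_two, ← bc_top M]
      have hD := down_loop M (M + 1) le_rfl []
      rw [hcast] at hD
      rw [hD]
      simp only [List.nil_append]
      rw [descList_reverse, sum_loop]
      simp
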